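-- pv_equiv track=rewrite | github.com/Wang-Yann/LeetCodeMe | python/CrackingTheCodingInterview_6/16_11_diving-board-lcci.py | divingBoard
-- ===== SOURCE A (Python) =====
-- from typing import List
--
-- def divingBoard(shorter: int, longer: int, k: int) -> List[int]:
--     if k == 0:
--         return []
--     ans = set()
--     for i in range(k + 1):
--         j = k - i
--         ans.add(shorter * i + longer * j)
--     return sorted(ans)
-- ===== SOURCE B (Python) =====
-- def divingBoard(shorter: int, longer: int, k: int):
--     if k <= 0:
--         return []
--     if shorter == longer:
--         return [shorter * k]
--     step = abs(longer - shorter)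
--     lo = min(shorter, longer) * k
--     return [lo + i * step for i in range(k + 1)]
-- ===== Notes on version B (the rewrite author's own statement) =====
-- stated objective: faster
-- what changed: Instead of inserting k+1 sums into a set and sorting, B emits the answer directly as the ascending arithmetic progression lo + i*|longer-shorter| starting at min(shorter,longer)*k, special-casing equal lengths.
import Mathlib
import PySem

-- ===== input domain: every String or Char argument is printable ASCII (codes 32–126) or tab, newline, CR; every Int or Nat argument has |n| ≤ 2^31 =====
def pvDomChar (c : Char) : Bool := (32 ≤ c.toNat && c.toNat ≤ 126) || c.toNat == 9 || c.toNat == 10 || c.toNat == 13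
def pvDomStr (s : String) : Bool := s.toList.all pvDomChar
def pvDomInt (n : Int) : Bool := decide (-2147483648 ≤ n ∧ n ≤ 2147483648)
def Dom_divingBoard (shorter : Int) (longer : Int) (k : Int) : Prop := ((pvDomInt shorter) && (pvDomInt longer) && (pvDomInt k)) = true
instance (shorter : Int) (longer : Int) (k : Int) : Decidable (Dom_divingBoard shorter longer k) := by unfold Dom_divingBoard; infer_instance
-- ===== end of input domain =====

-- B replaces A's set-then-sort with directly emitting the sorted arithmetic progression (O(k) vs O(k log k)).
-- ===== PORT A =====
def divingBoard (shorter : Int) (longer : Int) (k : Int) : List Int :=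
  if k == 0 then []
  else
    let ans : PySem.Set Int :=
      (PySem.List.pyRange 0 (k + 1) 1).foldl
        (fun ans i =>
          let j := k - i
          PySem.Set.add ans (shorter * i + longer * j))
        PySem.Set.empty
    PySem.List.sorted ans (fun x => x) false

-- ===== PORT B =====
def divingBoard_alt (shorter : Int) (longer : Int) (k : Int) : List Int :=
  if k ≤ 0 then []
  else if shorter == longer then [shorter * k]
  else
    let step := |longer - shorter|
    let lo := min shorter longer * k
    (PySem.List.pyRange 0 (k + 1) 1).map (fun i => lo + i * step)

-- ===== PRECONDITION & SPEC =====
def Spec_divingBoard (shorter : Int) (longer : Int) (k : Int) (out : List Int) : Prop := out = divingBoard_alt shorter longer k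
instance (shorter : Int) (longer : Int) (k : Int) (out : List Int) : Decidable (Spec_divingBoard shorter longer k out) := by unfold Spec_divingBoard; infer_instance

-- ===== CLAIM (what is proved, stated in full; the proofs are below) =====
def Claim_equal_divingBoard : Prop := ∀ (shorter : Int) (longer : Int) (k : Int), Dom_divingBoard shorter longer k → Spec_divingBoard shorter longer k (divingBoard shorter longer k)

-- ===== LEMMAS AND PROOFS =====

-- A's accumulated set is set(map v (range(0,k+1)))
theorem divingBoard_ans_eq (shorter longer k : Int) :
    ((PySem.List.pyRange 0 (k + 1) 1).foldl
        (fun ans i =>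
          let j := k - i
          PySem.Set.add ans (shorter * i + longer * j))
        PySem.Set.empty)
      = PySem.Set.ofList ((PySem.List.pyRange 0 (k + 1) 1).map
          (fun i => shorter * i + longer * (k - i))) := by
  rw [PySem.Set.ofList_eq_foldl, List.foldl_map]
  rfl

-- membership in A's value multiset
theorem divingBoard_mem_iff (shorter longer k x : Int) :
    x ∈ PySem.Set.ofList ((PySem.List.pyRange 0 (k + 1) 1).map
          (fun i => shorter * i + longer * (k - i)))
      ↔ ∃ i, 0 ≤ i ∧ i < k + 1 ∧ x = shorter * i + longer * (k - i) := by
  rw [PySem.Set.mem_ofList, List.mem_map]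
  constructor
  · rintro ⟨i, hi, rfl⟩
    rw [PySem.List.mem_pyRange_one] at hi
    exact ⟨i, hi.1, hi.2, rfl⟩
  · rintro ⟨i, h0, h1, rfl⟩
    exact ⟨i, PySem.List.mem_pyRange_one.mpr ⟨h0, h1⟩, rfl⟩

theorem divingBoard_main (shorter longer k : Int) (hk : 0 < k) :
    divingBoard shorter longer k = divingBoard_alt shorter longer k := by
  have hkne : ¬ (k == 0) = true := by simpa using (by omega : k ≠ 0)
  have hkle : ¬ k ≤ 0 := by omega
  unfold divingBoard divingBoard_alt
  simp only [hkne, Bool.false_eq_true, if_false, if_neg hkle]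
  rw [divingBoard_ans_eq]
  set v : Int → Int := fun i => shorter * i + longer * (k - i) with hv
  by_cases heq : shorter = longer
  · have hb : (shorter == longer) = true := by simpa using heq
    simp only [hb, if_true]
    apply PySem.List.sorted_eq_of_perm_of_pairwise_lt
    · rw [List.perm_ext_iff_of_nodup (by simp) (PySem.Set.nodup_ofList _)]
      intro x
      rw [divingBoard_mem_iff]
      constructor
      · intro hx
        simp only [List.mem_singleton] at hx
        exact ⟨0, le_refl _, by omega, by simp [hx, heq]⟩
      · rintro ⟨i, h0, h1, rfl⟩
        simp only [List.mem_singleton, ← heq]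
        ring
    · simp
  · have hb : ¬ (shorter == longer) = true := by simpa using heq
    simp only [hb, Bool.false_eq_true, if_false]
    set step := |longer - shorter| with hstep
    set lo := min shorter longer * k with hlo
    have hstep_pos : 0 < step := by
      rw [hstep]; rcases lt_or_gt_of_ne (fun h => heq h.symm) with h | h <;> [skip; skip] <;>
        simp [abs_pos] <;> omega
    have hmono : ∀ a b : Int, a < b → lo + a * step < lo + b * step := by
      intro a b hab
      have := mul_lt_mul_of_pos_right hab hstep_pos
      omega
    have hpw : ((PySem.List.pyRange 0 (k + 1) 1).map (fun i => lo + i * step)).Pairwise (· < ·) := by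
      exact List.Pairwise.map _ (fun a b h => hmono a b h) (PySem.List.pairwise_lt_pyRange_one 0 (k + 1))
    apply PySem.List.sorted_eq_of_perm_of_pairwise_lt _ _ _ _ hpw
    rw [List.perm_ext_iff_of_nodup hpw.nodup (PySem.Set.nodup_ofList _)]
    intro x
    rw [divingBoard_mem_iff, List.mem_map]
    constructor
    · rintro ⟨j, hj, rfl⟩
      rw [PySem.List.mem_pyRange_one] at hj
      rcases lt_or_gt_of_ne heq with h | h
      · -- shorter < longer : i := k - j
        refine ⟨k - j, by omega, by omega, ?_⟩
        rw [hlo, hstep, min_eq_left h.le, abs_of_pos (by omega)]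
        ring
      · -- longer < shorter : i := j
        refine ⟨j, hj.1, hj.2, ?_⟩
        rw [hlo, hstep, min_eq_right h.le, abs_of_neg (by omega)]
        ring
    · rintro ⟨i, h0, h1, rfl⟩
      rcases lt_or_gt_of_ne heq with h | h
      · refine ⟨k - i, PySem.List.mem_pyRange_one.mpr ⟨by omega, by omega⟩, ?_⟩
        rw [hlo, hstep, min_eq_left h.le, abs_of_pos (by omega)]
        ring
      · refine ⟨i, PySem.List.mem_pyRange_one.mpr ⟨h0, h1⟩, ?_⟩
        rw [hlo, hstep, min_eq_right h.le, abs_of_neg (by omega)]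
        ring

-- ===== VERDICT (by name: the statement is the Claim_ definition above) =====
theorem divingBoard_spec : Claim_equal_divingBoard := by
  intro s l k _
  unfold Spec_divingBoard
  by_cases hk : 0 < k
  · exact divingBoard_main s l k hk
  · have hk' : k ≤ 0 := by omega
    unfold divingBoard divingBoard_alt
    by_cases h0 : k = 0
    · simp [h0]
    · have : ¬ (k == 0) = true := by simpa using h0
      simp only [this, if_pos hk']
      rw [PySem.List.pyRange_one_eq_nil (by omega)]
      rfl
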